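-- pv_equiv track=rewrite | github.com/zory/CrossFire | generate_codemap.py | count_braces_outside_quotes
-- ===== SOURCE A (Python) =====
-- def count_braces_outside_quotes(line: str):
--     opens = closes = 0
--     in_string = False
--     in_char = False
--     escape = False
--     for ch in line:
--         if in_string:
--             if escape:
--                 escape = False
--             elif ch == '\\':
--                 escape = True
--             elif ch == '"':
--                 in_string = False
--             continue
--         if in_char:
--             if escape:
--                 escape = False
--             elif ch == '\\':
--                 escape = True
--             elif ch == "'":
--                 in_char = False
--             continue
--         if ch == '"':
--             in_string = True
--         elif ch == "'":
--             in_char = True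
--         elif ch == '{':
--             opens += 1
--         elif ch == '}':
--             closes += 1
--     return opens, closes
-- ===== SOURCE B (Python) =====
-- def count_braces_outside_quotes(line: str):
--     n = len(line)
--
--     def skip(i, q):
--         # return the index just past the closing quote q (escape-aware), or past end
--         while i < n:
--             c = line[i]
--             if c == '\\':
--                 i += 2
--             elif c == q:
--                 return i + 1
--             else:
--                 i += 1
--         return n
--
--     opens = closes = 0
--     i = 0
--     while i < n:
--         c = line[i]
--         if c == '"' or c == "'":
--             i = skip(i + 1, c)
--         else:
--             if c == '{':
--                 opens += 1
--             elif c == '}':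
--                 closes += 1
--             i += 1
--     return opens, closes
-- ===== Notes on version B (the rewrite author's own statement) =====
-- stated objective: simpler
-- what changed: Replaces A's single state machine with five mutable flags (in_string/in_char/escape) by a plain index scan that hands each quoted literal to a separate escape-aware skip helper, so the main loop has no mode flags at all.
import Mathlib
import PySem

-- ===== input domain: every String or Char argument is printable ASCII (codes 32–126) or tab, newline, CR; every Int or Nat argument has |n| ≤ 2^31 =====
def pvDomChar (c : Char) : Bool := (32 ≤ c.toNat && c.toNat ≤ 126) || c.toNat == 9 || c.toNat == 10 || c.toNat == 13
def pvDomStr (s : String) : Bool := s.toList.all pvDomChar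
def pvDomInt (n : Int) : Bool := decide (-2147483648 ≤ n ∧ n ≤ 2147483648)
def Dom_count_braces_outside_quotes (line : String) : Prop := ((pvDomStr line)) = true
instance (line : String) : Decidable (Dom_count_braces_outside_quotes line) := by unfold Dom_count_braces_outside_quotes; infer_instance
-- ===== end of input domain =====

-- B replaces A's five-variable boolean state machine by an index-free scan that
-- delegates each quoted literal to a separate escape-aware skip helper (objective: simpler).

-- ===== PORT A =====
-- state: (opens, closes, in_string, in_char, escape)
def pvStepA : (Int × Int × Bool × Bool × Bool) → Char → (Int × Int × Bool × Bool × Bool)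
  | (opens, closes, inStr, inChar, esc), ch =>
    if inStr then
      if esc then (opens, closes, inStr, inChar, false)
      else if ch = '\\' then (opens, closes, inStr, inChar, true)
      else if ch = '"' then (opens, closes, false, inChar, esc)
      else (opens, closes, inStr, inChar, esc)
    else if inChar then
      if esc then (opens, closes, inStr, inChar, false)
      else if ch = '\\' then (opens, closes, inStr, inChar, true)
      else if ch = '\'' then (opens, closes, inStr, false, esc)
      else (opens, closes, inStr, inChar, esc)
    else if ch = '"' then (opens, closes, true, inChar, esc)
    else if ch = '\'' then (opens, closes, inStr, true, esc)
    else if ch = '{' then (opens + 1, closes, inStr, inChar, esc)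
    else if ch = '}' then (opens, closes + 1, inStr, inChar, esc)
    else (opens, closes, inStr, inChar, esc)

def count_braces_outside_quotes (line : String) : Int × Int :=
  let s := line.toList.foldl pvStepA (0, 0, false, false, false)
  (s.1, s.2.1)

-- ===== PORT B =====
-- skip the rest of a quoted literal delimited by q; escape-aware ('\\' consumes the next char)
def pvSkip (q : Char) : List Char → List Char
  | [] => []
  | c :: cs =>
    if c = '\\' then
      match cs with
      | [] => []
      | _ :: rest => pvSkip q rest
    else if c = q then cs
    else pvSkip q cs

theorem pvSkip_length_le (q : Char) (l : List Char) : (pvSkip q l).length ≤ l.length := by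
  induction l using pvSkip.induct (q := q) <;> rw [pvSkip.eq_def] <;> simp_all <;> omega

def pvGo (l : List Char) (opens closes : Int) : Int × Int :=
  match l with
  | [] => (opens, closes)
  | ch :: rest =>
    if ch = '"' ∨ ch = '\'' then pvGo (pvSkip ch rest) opens closes
    else if ch = '{' then pvGo rest (opens + 1) closes
    else if ch = '}' then pvGo rest opens (closes + 1)
    else pvGo rest opens closes
termination_by l.length
decreasing_by
  · exact Nat.lt_succ_of_le (pvSkip_length_le _ _)
  all_goals simp

def count_braces_outside_quotes_alt (line : String) : Int × Int :=
  pvGo line.toList 0 0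

-- ===== PRECONDITION & SPEC =====
def Spec_count_braces_outside_quotes (line : String) (out : Int × Int) : Prop := out = count_braces_outside_quotes_alt line
instance (line : String) (out : Int × Int) : Decidable (Spec_count_braces_outside_quotes line out) := by unfold Spec_count_braces_outside_quotes; infer_instance

-- ===== CLAIM (what is proved, stated in full; the proofs are below) =====
def Claim_equal_count_braces_outside_quotes : Prop := ∀ (line : String), Dom_count_braces_outside_quotes line → Spec_count_braces_outside_quotes line (count_braces_outside_quotes line)

-- ===== LEMMAS AND PROOFS =====
def pvProj (s : Int × Int × Bool × Bool × Bool) : Int × Int := (s.1, s.2.1)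

-- simultaneous simulation: A's fold from the clean / in-string / in-char states
-- matches B's pvGo (after pvSkip for the literal states)
theorem pvSim (n : Nat) : ∀ (l : List Char), l.length ≤ n → ∀ (o c : Int),
    pvProj (l.foldl pvStepA (o, c, false, false, false)) = pvGo l o c
    ∧ pvProj (l.foldl pvStepA (o, c, true, false, false)) = pvGo (pvSkip '"' l) o c
    ∧ pvProj (l.foldl pvStepA (o, c, false, true, false)) = pvGo (pvSkip '\'' l) o c := by
  induction n with
  | zero =>
    intro l hl o c
    have : l = [] := List.eq_nil_of_length_eq_zero (Nat.le_zero.mp hl)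
    subst this
    simp [pvGo, pvSkip, pvProj]
  | succ n ih =>
    intro l hl o c
    match l with
    | [] => simp [pvGo, pvSkip, pvProj]
    | ch :: cs =>
      simp only [List.length_cons, Nat.succ_le_succ_iff] at hl
      refine ⟨?_, ?_, ?_⟩
      · -- clean state
        by_cases h1 : ch = '"'
        · subst h1
          rw [pvGo.eq_def]
          simpa [pvStepA] using (ih cs hl o c).2.1
        · by_cases h2 : ch = '\''
          · subst h2
            rw [pvGo.eq_def]
            simpa [pvStepA] using (ih cs hl o c).2.2
          · by_cases h3 : ch = '{'
            · subst h3
              rw [pvGo.eq_def]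
              simpa [pvStepA] using (ih cs hl (o + 1) c).1
            · by_cases h4 : ch = '}'
              · subst h4
                rw [pvGo.eq_def]
                simpa [pvStepA, h3] using (ih cs hl o (c + 1)).1
              · rw [pvGo.eq_def]
                simpa [pvStepA, h1, h2, h3, h4] using (ih cs hl o c).1
      · -- inside a double-quoted string
        by_cases h1 : ch = '\\'
        · subst h1
          match cs with
          | [] => simp [pvStepA, pvSkip, pvGo, pvProj]
          | c2 :: rest =>
            simp only [List.length_cons, Nat.succ_le_iff] at hl
            simpa [pvStepA, pvSkip] using (ih rest (Nat.le_of_lt hl) o c).2.1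
        · by_cases h2 : ch = '"'
          · subst h2
            rw [pvSkip.eq_def]
            simpa [pvStepA] using (ih cs hl o c).1
          · rw [pvSkip.eq_def]
            simpa [pvStepA, h1, h2] using (ih cs hl o c).2.1
      · -- inside a single-quoted char literal
        by_cases h1 : ch = '\\'
        · subst h1
          match cs with
          | [] => simp [pvStepA, pvSkip, pvGo, pvProj]
          | c2 :: rest =>
            simp only [List.length_cons, Nat.succ_le_iff] at hl
            simpa [pvStepA, pvSkip] using (ih rest (Nat.le_of_lt hl) o c).2.2
        · by_cases h2 : ch = '\''
          · subst h2
            rw [pvSkip.eq_def]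
            simpa [pvStepA] using (ih cs hl o c).1
          · rw [pvSkip.eq_def]
            simpa [pvStepA, h1, h2] using (ih cs hl o c).2.2

-- ===== VERDICT (by name: the statement is the Claim_ definition above) =====
theorem count_braces_outside_quotes_spec : Claim_equal_count_braces_outside_quotes := by
  intro line _
  unfold Spec_count_braces_outside_quotes count_braces_outside_quotes count_braces_outside_quotes_alt
  exact (pvSim line.toList.length line.toList le_rfl 0 0).1
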